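-- pv_equiv track=rewrite | github.com/nishi10mo/AtCoder | practice/AtCoder Beginner Contest/ABC282/C.py | f
-- ===== SOURCE A (Python) =====
-- def f(N, S):
--     quotation = "zero"
--     for i in range(N):
--         if S[i] == ',' and quotation == "zero":
--             S[i] = "."
--         elif  S[i] == '"' and quotation == "zero":
--             quotation = "first"
--         elif S[i] == '"' and quotation == "first":
--             quotation = "zero"
--     return S
-- ===== SOURCE B (Python) =====
-- def f(N, S):
--     # Segment view: split the first N elements on '"'; even-indexed segments are
--     # outside quotes, so replace ',' elements by '.' there; rejoin with '"' and
--     # write the result back into S in place.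
--     m = max(N, 0)
--     segs = []
--     cur = []
--     for x in S[:m]:
--         if x == '"':
--             segs.append(cur)
--             cur = []
--         else:
--             cur.append(x)
--     segs.append(cur)
--     out = []
--     for j, seg in enumerate(segs):
--         if j:
--             out.append('"')
--         if j % 2 == 0:
--             seg = ['.' if x == ',' else x for x in seg]
--         out.extend(seg)
--     for i in range(len(out)):
--         S[i] = out[i]
--     return S
-- ===== Notes on version B (the rewrite author's own statement) =====
-- stated objective: alternative
-- what changed: A walks the prefix with an explicit quote-state machine toggling on each '"'; B splits the first N elements on '"' into segments, replaces ',' by '.' only in even-indexed (outside-quote) segments, and rejoins with '"' before writing back.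
import Mathlib
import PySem

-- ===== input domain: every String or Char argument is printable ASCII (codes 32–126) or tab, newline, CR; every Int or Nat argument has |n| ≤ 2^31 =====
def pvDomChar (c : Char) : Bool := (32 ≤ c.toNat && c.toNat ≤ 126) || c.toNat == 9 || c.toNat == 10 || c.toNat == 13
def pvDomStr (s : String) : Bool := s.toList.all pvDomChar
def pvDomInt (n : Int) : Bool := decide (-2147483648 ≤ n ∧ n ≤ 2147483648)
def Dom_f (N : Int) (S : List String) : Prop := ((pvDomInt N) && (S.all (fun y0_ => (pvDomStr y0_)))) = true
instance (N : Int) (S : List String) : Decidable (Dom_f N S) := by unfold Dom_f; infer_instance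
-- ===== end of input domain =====

-- B replaces A's character-by-character quote-state machine by a segment view (split the
-- prefix on '"', replace ',' in even segments, rejoin); same cost, different structure.
-- Both A and B mutate S in place in Python; the equivalence proved here is about the
-- return value (B performs the same write-back).

-- ===== PORT A =====
def f (N : Int) (S : List String) : List String :=
  let r := (PySem.List.pyRange 0 N 1).foldl (fun (st : List String × String) i =>
    match PySem.List.pyGet? st.1 i with
    | none => st      -- Python raises IndexError here; excluded by Pre_f
    | some c =>
      if c == "," && st.2 == "zero" then (st.1.set i.toNat ".", st.2)  -- i comes from range(N), so i ≥ 0 and set at i.toNat is exact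
      else if c == "\"" && st.2 == "zero" then (st.1, "first")
      else if c == "\"" && st.2 == "first" then (st.1, "zero")
      else st) (S, "zero")
  r.1

-- ===== PORT B =====
def f_alt (N : Int) (S : List String) : List String :=
  let m : Int := max N 0
  let p := PySem.List.slice S none (some m)          -- S[:m]
  let acc := p.foldl (fun (st : List (List String) × List String) x =>
      if x == "\"" then (st.1 ++ [st.2], []) else (st.1, st.2 ++ [x])) ([], [])
  let segs := acc.1 ++ [acc.2]
  let out := (PySem.List.enumerate segs).foldl (fun (out : List String) js =>
      let seg := if js.1 % 2 == 0 then js.2.map (fun x => if x == "," then "." else x) else js.2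
      (if js.1 != 0 then out ++ ["\""] else out) ++ seg) []
  out ++ S.drop out.length   -- write-back 'for i in range(len(out)): S[i] = out[i]'

-- ===== PRECONDITION & SPEC =====
-- Pre_f excludes exactly the inputs where A raises IndexError (N larger than len(S)).
def Pre_f (N : Int) (S : List String) : Prop := N ≤ (S.length : Int)
instance (N : Int) (S : List String) : Decidable (Pre_f N S) := by unfold Pre_f; infer_instance
def pvWitness_f : Int × List String := (5, ["a", ",", "\"", ",", "\""])
def Spec_f (N : Int) (S : List String) (out : List String) : Prop := out = f_alt N S
instance (N : Int) (S : List String) (out : List String) : Decidable (Spec_f N S out) := by unfold Spec_f; infer_instance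

-- ===== CLAIM (what is proved, stated in full; the proofs are below) =====
def Claim_equal_f : Prop := ∀ (N : Int) (S : List String), Dom_f N S → Pre_f N S → Spec_f N S (f N S)

-- ===== LEMMAS AND PROOFS =====

-- The one-element step of A's state machine: (output element, new quote state).
def stepQ (q : String) (x : String) : String × String :=
  if x == "," && q == "zero" then (".", q)
  else if x == "\"" && q == "zero" then (x, "first")
  else if x == "\"" && q == "first" then (x, "zero")
  else (x, q)

-- Structural version of A's loop on the processed prefix.
def mach : String → List String → List String × String
  | q, [] => ([], q)
  | q, x :: xs =>
    let yq := stepQ q x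
    let r := mach yq.2 xs
    (yq.1 :: r.1, r.2)

-- B's split of a list on '"' (always nonempty; segments between quotes).
def splitQ : List String → List (List String)
  | [] => [[]]
  | x :: xs =>
    if x == "\"" then [] :: splitQ xs
    else
      match splitQ xs with
      | [] => [[x]]
      | s :: t => (x :: s) :: t

def mapRepl (seg : List String) : List String := seg.map (fun x => if x == "," then "." else x)

-- Rejoin the segments after the first; e = whether the next segment is even-indexed.
def joinRest : Bool → List (List String) → List String
  | _, [] => []
  | e, s :: t => "\"" :: ((if e then mapRepl s else s) ++ joinRest (!e) t)

def joinSegs (e : Bool) (l : List (List String)) : List String :=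
  match l with
  | [] => []
  | s :: t => (if e then mapRepl s else s) ++ joinRest (!e) t

lemma splitQ_ne_nil (xs : List String) : splitQ xs ≠ [] := by
  cases xs with
  | nil => simp [splitQ]
  | cons x xs =>
    simp only [splitQ]
    split
    · simp
    · cases h : splitQ xs <;> simp

lemma mach_length (q : String) (xs : List String) : (mach q xs).1.length = xs.length := by
  induction xs generalizing q with
  | nil => rfl
  | cons x xs ih => simp [mach, ih]

-- A-side loop characterisation.
lemma A_loop (T : List String) : ∀ (P R : List String) (q : String) (N : Int),
    N = (P.length : Int) + T.length →
    (PySem.List.pyRange (P.length : Int) N 1).foldl (fun (st : List String × String) i =>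
      match PySem.List.pyGet? st.1 i with
      | none => st
      | some c =>
        if c == "," && st.2 == "zero" then (st.1.set i.toNat ".", st.2)
        else if c == "\"" && st.2 == "zero" then (st.1, "first")
        else if c == "\"" && st.2 == "first" then (st.1, "zero")
        else st) (P ++ T ++ R, q)
    = (P ++ (mach q T).1 ++ R, (mach q T).2) := by
  induction T with
  | nil =>
    intro P R q N hN
    simp only [List.length_nil, Nat.cast_zero, add_zero] at hN
    rw [PySem.List.pyRange_one_eq_nil (by omega)]
    simp [mach]
  | cons x xs ih =>
    intro P R q N hN
    rw [PySem.List.pyRange_one_cons (by simp at hN ⊢; omega)]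
    rw [List.foldl_cons]
    have hget : PySem.List.pyGet? (P ++ (x :: xs) ++ R) ((P.length : Int)) = some x := by
      rw [PySem.List.pyGet?_natCast]
      rw [List.append_assoc]
      rw [List.getElem?_append_right (le_refl _)]
      simp
    have hset : (P ++ (x :: xs) ++ R).set ((P.length : Int)).toNat "." = P ++ ("." :: xs) ++ R := by
      simp [List.append_assoc]
    have key : (match PySem.List.pyGet? (P ++ x :: xs ++ R, q).1 ((P.length : Int)) with
      | none => (P ++ x :: xs ++ R, q)
      | some c =>
        if c == "," && (P ++ x :: xs ++ R, q).2 == "zero" then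
          ((P ++ x :: xs ++ R, q).1.set ((P.length : Int)).toNat ".", (P ++ x :: xs ++ R, q).2)
        else if c == "\"" && (P ++ x :: xs ++ R, q).2 == "zero" then ((P ++ x :: xs ++ R, q).1, "first")
        else if c == "\"" && (P ++ x :: xs ++ R, q).2 == "first" then ((P ++ x :: xs ++ R, q).1, "zero")
        else (P ++ x :: xs ++ R, q))
        = ((P ++ [(stepQ q x).1]) ++ xs ++ R, (stepQ q x).2) := by
      rw [hget]
      simp only [stepQ]
      by_cases h1 : x == "," && q == "zero"
      · simp only [h1, hset]
        simp at h1
        simp [h1]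
      · simp only [h1]
        by_cases h2 : x == "\"" && q == "zero"
        · simp [h2]
        · simp only [h2]
          by_cases h3 : x == "\"" && q == "first"
          · simp [h3]
          · simp [h3]
    rw [key]
    have harith : ((P.length : Int) + 1) = (((P ++ [(stepQ q x).1]).length : Nat) : Int) := by
      simp
    rw [harith]
    rw [ih (P ++ [(stepQ q x).1]) R (stepQ q x).2 N (by simp at hN ⊢; omega)]
    simp [mach]

lemma f_eq_mach (N : Int) (S : List String) (h : N ≤ (S.length : Int)) :
    f N S = (mach "zero" (S.take N.toNat)).1 ++ S.drop N.toNat := by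
  by_cases hneg : N ≤ 0
  · have hz : N.toNat = 0 := by omega
    have key : f N S = S := by
      unfold f
      rw [PySem.List.pyRange_one_eq_nil (by omega)]
      rfl
    rw [key]
    simp [hz, mach]
  · have hlen : ((S.take N.toNat).length : Int) = N := by
      rw [List.length_take]; omega
    have key := A_loop (S.take N.toNat) [] (S.drop N.toNat) "zero" N
      (by simp only [List.length_nil, Nat.cast_zero, zero_add]; exact hlen.symm)
    simp only [List.nil_append, List.length_nil, Nat.cast_zero, List.take_append_drop] at key
    have := congrArg Prod.fst key
    simp only at this
    exact this

-- B-side: the split fold builds splitQ.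
def consHead (cur : List String) : List (List String) → List (List String)
  | [] => [cur]
  | s :: t => (cur ++ s) :: t

lemma B_split (xs : List String) : ∀ (sg : List (List String)) (cur : List String),
    (xs.foldl (fun (st : List (List String) × List String) x =>
        if x == "\"" then (st.1 ++ [st.2], []) else (st.1, st.2 ++ [x])) (sg, cur)).1
      ++ [(xs.foldl (fun (st : List (List String) × List String) x =>
        if x == "\"" then (st.1 ++ [st.2], []) else (st.1, st.2 ++ [x])) (sg, cur)).2]
    = sg ++ consHead cur (splitQ xs) := by
  induction xs with
  | nil => intro sg cur; simp [splitQ, consHead]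
  | cons x xs ih =>
    intro sg cur
    rw [List.foldl_cons]
    by_cases hq : (x == "\"") = true
    · rw [if_pos hq, ih]
      simp only [splitQ, if_pos hq]
      rcases h : splitQ xs with _ | ⟨s, t⟩
      · exact absurd h (splitQ_ne_nil xs)
      · simp [consHead]
    · rw [if_neg hq, ih]
      simp only [splitQ, if_neg hq]
      rcases h : splitQ xs with _ | ⟨s, t⟩
      · exact absurd h (splitQ_ne_nil xs)
      · simp [consHead]

-- Parity step on Int indices.
lemma emod_step (k : Int) : ((k + 1) % 2 == 0) = !(k % 2 == 0) := by
  by_cases h : k % 2 = 0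
  · have h1 : (k + 1) % 2 = 1 := by omega
    simp [h, h1]
  · have h0 : k % 2 = 1 := by omega
    have h1 : (k + 1) % 2 = 0 := by omega
    simp [h0, h1]

-- B-side: the rejoin fold computes joinRest / joinSegs.
lemma B_join_rest (segs : List (List String)) : ∀ (k : Int) (acc : List String), 1 ≤ k →
    (PySem.List.enumerate segs k).foldl (fun (out : List String) js =>
      (if js.1 != 0 then out ++ ["\""] else out) ++
        (if js.1 % 2 == 0 then mapRepl js.2 else js.2)) acc
    = acc ++ joinRest (k % 2 == 0) segs := by
  induction segs with
  | nil => intro k acc _; simp [PySem.List.enumerate_nil, joinRest]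
  | cons s t ih =>
    intro k acc hk
    rw [PySem.List.enumerate_cons, List.foldl_cons]
    have hk0 : (k != 0) = true := by simp; omega
    rw [ih (k + 1) _ (by omega)]
    rw [emod_step]
    simp only [hk0, joinRest]
    simp

lemma B_join (segs : List (List String)) :
    (PySem.List.enumerate segs 0).foldl (fun (out : List String) js =>
      (if js.1 != 0 then out ++ ["\""] else out) ++
        (if js.1 % 2 == 0 then mapRepl js.2 else js.2)) []
    = joinSegs true segs := by
  cases segs with
  | nil => simp [PySem.List.enumerate_nil, joinSegs]
  | cons s t =>
    rw [PySem.List.enumerate_cons, List.foldl_cons]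
    rw [show ((0 : Int) + 1) = 1 from rfl]
    rw [B_join_rest t 1 _ (le_refl _)]
    rw [show ((1 : Int) % 2 == 0) = false by decide]
    norm_num [joinSegs]

-- Small-step facts about stepQ.
lemma stepQ_comma : stepQ "zero" "," = (".", "zero") := rfl
lemma stepQ_zero_quote : stepQ "zero" "\"" = ("\"", "first") := rfl
lemma stepQ_first_quote : stepQ "first" "\"" = ("\"", "zero") := rfl
lemma stepQ_zero_other (x : String) (h1 : (x == ",") = false) (h2 : (x == "\"") = false) :
    stepQ "zero" x = (x, "zero") := by simp [stepQ, h1, h2]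
lemma stepQ_first_other (x : String) (h2 : (x == "\"") = false) :
    stepQ "first" x = (x, "first") := by simp [stepQ, h2]

-- The machine result equals the segment-wise description.
lemma mach_eq_join (xs : List String) :
    (mach "zero" xs).1 = joinSegs true (splitQ xs) ∧
    (mach "first" xs).1 = joinSegs false (splitQ xs) := by
  induction xs with
  | nil => simp [mach, splitQ, joinSegs, joinRest, mapRepl]
  | cons x xs ih =>
    obtain ⟨ih0, ih1⟩ := ih
    rcases hs : splitQ xs with _ | ⟨s, t⟩
    · exact absurd hs (splitQ_ne_nil xs)
    by_cases hq : (x == "\"") = true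
    · have hx : x = "\"" := by simpa using hq
      subst hx
      constructor
      · simp only [mach, stepQ_zero_quote]
        rw [ih1, hs]
        simp [splitQ, hs, joinSegs, joinRest, mapRepl]
      · simp only [mach, stepQ_first_quote]
        rw [ih0, hs]
        simp [splitQ, hs, joinSegs, joinRest, mapRepl]
    · have hqf : (x == "\"") = false := by simpa using hq
      have hsx : splitQ (x :: xs) = (x :: s) :: t := by
        simp only [splitQ, if_neg hq, hs]
      by_cases hc : (x == ",") = true
      · have hx : x = "," := by simpa using hc
        subst hx
        constructor
        · simp only [mach, stepQ_comma]
          rw [ih0, hsx, hs]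
          simp [joinSegs, mapRepl]
        · simp only [mach, stepQ_first_other _ hqf]
          rw [ih1, hsx, hs]
          simp [joinSegs]
      · have hcf : (x == ",") = false := by simpa using hc
        constructor
        · simp only [mach, stepQ_zero_other _ hcf hqf]
          rw [ih0, hsx, hs]
          simp only [joinSegs, mapRepl, List.map_cons]
          rw [show (if (x == ",") = true then "." else x) = x from by rw [hcf]; rfl]
          simp
        · simp only [mach, stepQ_first_other _ hqf]
          rw [ih1, hsx, hs]
          simp [joinSegs]

lemma f_alt_eq_mach (N : Int) (S : List String) :
    f_alt N S = (mach "zero" (S.take N.toNat)).1 ++ S.drop N.toNat := by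
  simp only [f_alt]
  have hm : (max N 0) = ((N.toNat : Nat) : Int) := by omega
  rw [hm, PySem.List.slice_to_natCast]
  rw [B_split (S.take N.toNat) [] []]
  have hhead : consHead [] (splitQ (S.take N.toNat)) = splitQ (S.take N.toNat) := by
    rcases h : splitQ (S.take N.toNat) with _ | ⟨s, t⟩
    · exact absurd h (splitQ_ne_nil _)
    · simp [consHead]
  rw [List.nil_append, hhead]
  have hjoin := B_join (splitQ (S.take N.toNat))
  simp only [mapRepl] at hjoin
  rw [hjoin]
  rw [← (mach_eq_join (S.take N.toNat)).1]
  rw [mach_length]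
  congr 1
  rw [List.length_take]
  by_cases h : N.toNat ≤ S.length
  · rw [min_eq_left h]
  · rw [min_eq_right (by omega)]
    rw [List.drop_length, List.drop_of_length_le (by omega)]

-- ===== VERDICT (by name: the statement is the Claim_ definition above) =====
theorem f_spec : Claim_equal_f := by
  intro N S _ hpre
  unfold Spec_f
  rw [f_eq_mach N S hpre, f_alt_eq_mach N S]
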